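-- pv_equiv track=rewrite | github.com/giper45/guaroquestions | scripts/generate.py | process_text_to_json
-- ===== SOURCE A (Python) =====
-- def process_text_to_json(text):
--     lines = text.splitlines()
--     questions = []
--     current_question = {}
--     for line in lines:
--         line = line.strip()
--         if line.startswith("ANSWER:"):
--             current_question["risposta"] = line.replace("ANSWER:", "").strip()
--             questions.append(current_question)
--             current_question = {}
--         elif line.startswith("A."):
--             current_question["a"] = line[2:].strip()
--         elif line.startswith("B."):
--             current_question["b"] = line[2:].strip()
--         elif line.startswith("C."):
--             current_question["c"] = line[2:].strip()
--         elif line.startswith("D."):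
--             current_question["d"] = line[2:].strip()
--         elif line.startswith("E."):
--             current_question["e"] = line[2:].strip()
--         elif line:
--             if "domanda" not in current_question:
--                 current_question["domanda"] = line.strip()
--
--     return {"root": questions}
-- ===== SOURCE B (Python) =====
-- def _parse_block(body, answer_line):
--     q = {}
--     for line in body:
--         if line.startswith("A."):
--             q["a"] = line[2:].strip()
--         elif line.startswith("B."):
--             q["b"] = line[2:].strip()
--         elif line.startswith("C."):
--             q["c"] = line[2:].strip()
--         elif line.startswith("D."):
--             q["d"] = line[2:].strip()
--         elif line.startswith("E."):
--             q["e"] = line[2:].strip()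
--         elif line:
--             if "domanda" not in q:
--                 q["domanda"] = line
--     q["risposta"] = answer_line.replace("ANSWER:", "").strip()
--     return q
--
--
-- def process_text_to_json(text):
--     # pass 1: cut the stripped lines into blocks, each closed by its ANSWER line;
--     # a trailing block with no ANSWER line is discarded
--     blocks = []
--     body = []
--     for raw in text.splitlines():
--         line = raw.strip()
--         if line.startswith("ANSWER:"):
--             blocks.append((body, line))
--             body = []
--         else:
--             body.append(line)
--     # pass 2: turn each closed block into a question dict
--     return {"root": [_parse_block(b, a) for (b, a) in blocks]}
-- ===== Notes on version B (the rewrite author's own statement) =====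
-- stated objective: alternative
-- what changed: B replaces A's single stateful scan with two passes: first cut the stripped lines into blocks each closed by its ANSWER line (discarding a trailing unterminated block), then convert each closed block into a question dict.
import Mathlib
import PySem

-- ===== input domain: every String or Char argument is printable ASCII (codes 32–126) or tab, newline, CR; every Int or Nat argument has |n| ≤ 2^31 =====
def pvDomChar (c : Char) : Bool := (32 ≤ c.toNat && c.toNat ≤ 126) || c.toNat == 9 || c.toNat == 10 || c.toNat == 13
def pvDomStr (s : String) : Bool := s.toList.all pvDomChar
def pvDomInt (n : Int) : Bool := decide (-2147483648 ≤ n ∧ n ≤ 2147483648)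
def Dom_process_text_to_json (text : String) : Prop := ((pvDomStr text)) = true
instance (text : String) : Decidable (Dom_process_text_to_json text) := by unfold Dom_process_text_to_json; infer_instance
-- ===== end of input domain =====

-- B re-decomposes A's single stateful scan into two passes: pass 1 groups stripped lines into
-- blocks closed by their ANSWER line (a trailing unterminated block is discarded), pass 2 turns
-- each closed block into a question dict. Same output; objective: alternative decomposition.

-- ===== PORT A =====
-- loop body of A's for-loop, named so the proofs can speak about one step
def pvStepA (st : List (PySem.Dict String String) × PySem.Dict String String) (rawline : String) :
    List (PySem.Dict String String) × PySem.Dict String String :=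
  let line := PySem.Str.strip rawline
  if PySem.Str.startswith line "ANSWER:" then
    (st.1 ++ [st.2.insert "risposta" (PySem.Str.strip (PySem.Str.replace line "ANSWER:" ""))],
     PySem.Dict.empty)
  else if PySem.Str.startswith line "A." then
    (st.1, st.2.insert "a" (PySem.Str.strip (PySem.Str.slice line (some 2) none)))
  else if PySem.Str.startswith line "B." then
    (st.1, st.2.insert "b" (PySem.Str.strip (PySem.Str.slice line (some 2) none)))
  else if PySem.Str.startswith line "C." then
    (st.1, st.2.insert "c" (PySem.Str.strip (PySem.Str.slice line (some 2) none)))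
  else if PySem.Str.startswith line "D." then
    (st.1, st.2.insert "d" (PySem.Str.strip (PySem.Str.slice line (some 2) none)))
  else if PySem.Str.startswith line "E." then
    (st.1, st.2.insert "e" (PySem.Str.strip (PySem.Str.slice line (some 2) none)))
  else if line ≠ "" then
    if st.2.contains "domanda" then st
    else (st.1, st.2.insert "domanda" (PySem.Str.strip line))
  else st

def process_text_to_json (text : String) : List (String × List (List (String × String))) :=
  let s := (PySem.Str.splitlines text).foldl pvStepA ([], PySem.Dict.empty)
  [("root", s.1.map PySem.Dict.items)]

-- ===== PORT B =====
-- per-line step of _parse_block's loop (lines arrive already stripped from pass 1)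
def pvBodyStep (q : PySem.Dict String String) (line : String) : PySem.Dict String String :=
  if PySem.Str.startswith line "A." then
    q.insert "a" (PySem.Str.strip (PySem.Str.slice line (some 2) none))
  else if PySem.Str.startswith line "B." then
    q.insert "b" (PySem.Str.strip (PySem.Str.slice line (some 2) none))
  else if PySem.Str.startswith line "C." then
    q.insert "c" (PySem.Str.strip (PySem.Str.slice line (some 2) none))
  else if PySem.Str.startswith line "D." then
    q.insert "d" (PySem.Str.strip (PySem.Str.slice line (some 2) none))
  else if PySem.Str.startswith line "E." then
    q.insert "e" (PySem.Str.strip (PySem.Str.slice line (some 2) none))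
  else if line ≠ "" then
    if q.contains "domanda" then q else q.insert "domanda" line
  else q

-- _parse_block: body lines folded into a dict, then the terminating ANSWER line
def pvParseBlock (b : List String × String) : PySem.Dict String String :=
  (b.1.foldl pvBodyStep PySem.Dict.empty).insert "risposta"
    (PySem.Str.strip (PySem.Str.replace b.2 "ANSWER:" ""))

-- pass 1 loop body: group stripped lines into (body, answer-line) blocks
def pvStepG (st : List (List String × String) × List String) (raw : String) :
    List (List String × String) × List String :=
  let line := PySem.Str.strip raw
  if PySem.Str.startswith line "ANSWER:" then (st.1 ++ [(st.2, line)], [])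
  else (st.1, st.2 ++ [line])

def process_text_to_json_alt (text : String) : List (String × List (List (String × String))) :=
  let g := (PySem.Str.splitlines text).foldl pvStepG ([], [])
  [("root", (g.1.map pvParseBlock).map PySem.Dict.items)]

-- ===== PRECONDITION & SPEC =====
def Spec_process_text_to_json (text : String) (out : List (String × List (List (String × String)))) : Prop := out = process_text_to_json_alt text
instance (text : String) (out : List (String × List (List (String × String)))) : Decidable (Spec_process_text_to_json text out) := by unfold Spec_process_text_to_json; infer_instance

-- ===== CLAIM (what is proved, stated in full; the proofs are below) =====
def Claim_equal_process_text_to_json : Prop := ∀ (text : String), Dom_process_text_to_json text → Spec_process_text_to_json text (process_text_to_json text)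

-- ===== LEMMAS AND PROOFS =====

lemma pvDropWhile_idem {α : Type} (p : α → Bool) (l : List α) :
    List.dropWhile p (List.dropWhile p l) = List.dropWhile p l := by
  induction l with
  | nil => rfl
  | cons a t ih =>
    by_cases h : p a = true <;> simp [h, ih]

lemma pvLstripRstrip (x : List Char) (h : PySem.Chars.lstrip x = x) :
    PySem.Chars.lstrip (PySem.Chars.rstrip x) = PySem.Chars.rstrip x := by
  cases x with
  | nil => rfl
  | cons a t =>
    have ha : PySem.Chars.isspace a = false := by
      by_contra hc
      have ha' : PySem.Chars.isspace a = true := by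
        cases hb : PySem.Chars.isspace a
        · exact absurd hb hc
        · rfl
      have := h
      simp only [PySem.Chars.lstrip, List.dropWhile_cons, ha'] at this
      simp only [if_true] at this
      have hle := List.length_dropWhile_le (p := PySem.Chars.isspace) (l := t)
      rw [this] at hle
      simp at hle
    simp only [PySem.Chars.rstrip, PySem.Chars.lstrip, List.reverse_cons]
    rcases h' : List.dropWhile PySem.Chars.isspace t.reverse with _ | ⟨b, u⟩
    · rw [List.dropWhile_append]
      simp [h', ha]
    · rw [List.dropWhile_append]
      simp [h', ha]

lemma pvStripStrip (s : List Char) :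
    PySem.Chars.strip (PySem.Chars.strip s) = PySem.Chars.strip s := by
  show PySem.Chars.rstrip (PySem.Chars.lstrip (PySem.Chars.rstrip (PySem.Chars.lstrip s)))
      = PySem.Chars.rstrip (PySem.Chars.lstrip s)
  rw [pvLstripRstrip (PySem.Chars.lstrip s) (pvDropWhile_idem _ _)]
  simp [PySem.Chars.rstrip, pvDropWhile_idem]

lemma pvStrStripStrip (s : String) :
    PySem.Str.strip (PySem.Str.strip s) = PySem.Str.strip s := by
  simp [PySem.Str.strip, pvStripStrip]

-- one non-ANSWER step of A acts on the current dict exactly like B's body step on the stripped line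
set_option maxHeartbeats 1000000 in
lemma pvStepA_not_answer (qs : List (PySem.Dict String String)) (q : PySem.Dict String String)
    (raw : String) (h : ¬ PySem.Str.startswith (PySem.Str.strip raw) "ANSWER:" = true) :
    pvStepA (qs, q) raw = (qs, pvBodyStep q (PySem.Str.strip raw)) := by
  simp only [pvStepA, pvBodyStep, pvStrStripStrip]
  rw [if_neg h]
  split_ifs <;> rfl

-- the loop invariant: A's (questions, current) is B's (blocks, body) under pvParseBlock / pvBodyStep
lemma pvMain (lines : List String) : ∀ (bl : List (List String × String)) (cur : List String),
    (lines.foldl pvStepA (bl.map pvParseBlock, cur.foldl pvBodyStep PySem.Dict.empty)).1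
      = ((lines.foldl pvStepG (bl, cur)).1).map pvParseBlock := by
  induction lines with
  | nil => intro bl cur; simp
  | cons raw rest ih =>
    intro bl cur
    simp only [List.foldl_cons]
    by_cases h : PySem.Str.startswith (PySem.Str.strip raw) "ANSWER:" = true
    · have hA : pvStepA (bl.map pvParseBlock, cur.foldl pvBodyStep PySem.Dict.empty) raw
          = ((bl ++ [(cur, PySem.Str.strip raw)]).map pvParseBlock,
             ([] : List String).foldl pvBodyStep PySem.Dict.empty) := by
        simp only [pvStepA]
        rw [if_pos h]
        simp only [pvParseBlock, List.map_append, List.map_cons, List.map_nil, List.foldl_nil]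
      have hG : pvStepG (bl, cur) raw = (bl ++ [(cur, PySem.Str.strip raw)], ([] : List String)) := by
        simp only [pvStepG]
        rw [if_pos h]
      rw [hA, hG]
      exact ih _ _
    · rw [pvStepA_not_answer _ _ _ h]
      have hG : pvStepG (bl, cur) raw = (bl, cur ++ [PySem.Str.strip raw]) := by
        simp only [pvStepG]
        rw [if_neg h]
      rw [hG]
      have h2 := ih bl (cur ++ [PySem.Str.strip raw])
      rw [List.foldl_append] at h2
      simpa using h2

-- ===== VERDICT (by name: the statement is the Claim_ definition above) =====
theorem process_text_to_json_spec : Claim_equal_process_text_to_json := by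
  intro text _
  unfold Spec_process_text_to_json process_text_to_json process_text_to_json_alt
  have h := pvMain (PySem.Str.splitlines text) [] []
  simp only [List.map_nil, List.foldl_nil] at h
  simp [h]
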